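-- pv_equiv track=rewrite | github.com/ahochma/dictionaries | ex4_312485261.py | get_frequent_locations
-- ===== SOURCE A (Python) =====
-- def get_frequent_locations(text, locations):
-- 	# Write the rest of the code for question 3 below this line.
--     lst = []
--     dic = {}
--     only_words = text.split()
--     for word in only_words:
--         for i in range(len(locations)):
--             if locations[i] == word.partition(locations[i])[1]:
--                 if locations[i] in dic:
--                     dic[locations[i]] += 1
--                 else:
--                     dic[locations[i]] = 1
--     dict_keys = dic.keys()
--     sorted_dic = sorted(dict_keys, key = dic.get, reverse = True)
--     return sorted_dic[:2]
-- ===== SOURCE B (Python) =====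
-- def get_frequent_locations(text, locations):
--     # Same result, computed over DISTINCT words and DISTINCT locations with
--     # multiplicities, so duplicated words/locations are scanned only once.
--     loc_mult = {}
--     for loc in locations:
--         loc_mult[loc] = loc_mult.get(loc, 0) + 1
--     word_mult = {}
--     for word in text.split():
--         word_mult[word] = word_mult.get(word, 0) + 1
--     counts = {}
--     for word, wm in word_mult.items():
--         for loc, lm in loc_mult.items():
--             if loc in word:
--                 counts[loc] = counts.get(loc, 0) + wm * lm
--     return sorted(counts, key=counts.get, reverse=True)[:2]
-- ===== Notes on version B (the rewrite author's own statement) =====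
-- stated objective: alternative
-- what changed: B collapses the words and the locations into multiplicity counters and tests each DISTINCT word against each DISTINCT location once (adding the product of multiplicities to the counter it then sorts), instead of A's partition-based scan of every word occurrence against every location occurrence.
import Mathlib
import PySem

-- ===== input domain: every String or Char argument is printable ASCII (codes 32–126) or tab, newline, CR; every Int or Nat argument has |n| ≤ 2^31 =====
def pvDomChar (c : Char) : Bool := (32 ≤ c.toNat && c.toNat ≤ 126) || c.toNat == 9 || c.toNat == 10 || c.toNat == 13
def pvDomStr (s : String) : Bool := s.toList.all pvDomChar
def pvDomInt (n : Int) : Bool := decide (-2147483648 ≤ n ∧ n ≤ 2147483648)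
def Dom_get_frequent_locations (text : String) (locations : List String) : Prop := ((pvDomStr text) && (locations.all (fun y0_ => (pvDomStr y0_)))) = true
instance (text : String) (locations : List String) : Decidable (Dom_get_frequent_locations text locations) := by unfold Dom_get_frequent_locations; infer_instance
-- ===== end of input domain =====

-- B counts over DISTINCT words and DISTINCT locations with multiplicities (two counters),
-- instead of A's scan of every word against every location occurrence; same result.

-- ===== PORT A =====
/-- `s.partition(sep)` — exact for `sep ≠ []` (Python raises ValueError on an empty
    separator; those inputs are excluded by `Pre_get_frequent_locations`). -/
def pyPartition (s sep : List Char) : List Char × List Char × List Char :=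
  let i := PySem.Chars.find s sep
  if i < 0 then (s, [], [])
  else (s.take i.toNat, sep, s.drop (i.toNat + sep.length))

def get_frequent_locations (text : String) (locations : List String) : List String :=
  let only_words := PySem.Str.split₀ text
  let dic : PySem.Dict String Int :=
    only_words.foldl (fun dic word =>
      (PySem.List.pyRange 0 (locations.length : Int) 1).foldl (fun dic i =>
        -- locations[i]: i is drawn from range(len(locations)), always in range
        let li := PySem.List.pyGetD locations i ""
        if li.toList = (pyPartition word.toList li.toList).2.1 then
          (if dic.contains li then dic.modify li 0 (· + 1) else dic.insert li 1)
        else dic) dic) PySem.Dict.empty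
  -- key = dic.get: every key sorted is a key of dic, so dic.get(k) is its value (getD 0 is exact here)
  PySem.List.slice (PySem.List.sorted dic.keys (fun k => dic.getD k 0) true) none (some 2)

-- ===== PORT B =====
def get_frequent_locations_alt (text : String) (locations : List String) : List String :=
  let loc_mult : PySem.Dict String Int :=
    locations.foldl (fun d loc => d.insert loc (d.getD loc 0 + 1)) PySem.Dict.empty
  let word_mult : PySem.Dict String Int :=
    (PySem.Str.split₀ text).foldl (fun d w => d.insert w (d.getD w 0 + 1)) PySem.Dict.empty
  let counts : PySem.Dict String Int :=
    word_mult.items.foldl (fun counts p =>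
      loc_mult.items.foldl (fun counts q =>
        if PySem.Str.isIn q.1 p.1 then counts.insert q.1 (counts.getD q.1 0 + p.2 * q.2)
        else counts) counts) PySem.Dict.empty
  PySem.List.slice (PySem.List.sorted counts.keys (fun k => counts.getD k 0) true) none (some 2)

-- ===== PRECONDITION & SPEC =====
-- Pre_ excludes exactly the inputs where A raises: word.partition("") raises ValueError,
-- reached iff "" is among the locations and the text has at least one word (text.strip() != "").
def Pre_get_frequent_locations (text : String) (locations : List String) : Prop :=
  "" ∈ locations → PySem.Str.strip text = ""
instance (text : String) (locations : List String) : Decidable (Pre_get_frequent_locations text locations) := by unfold Pre_get_frequent_locations; infer_instance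

def pvWitness_get_frequent_locations : String × List String := ("aa b ab aa", ["a", "b", "aa", "a"])

def Spec_get_frequent_locations (text : String) (locations : List String) (out : List String) : Prop := out = get_frequent_locations_alt text locations
instance (text : String) (locations : List String) (out : List String) : Decidable (Spec_get_frequent_locations text locations out) := by unfold Spec_get_frequent_locations; infer_instance

-- ===== CLAIM (what is proved, stated in full; the proofs are below) =====
def Claim_equal_get_frequent_locations : Prop := ∀ (text : String) (locations : List String), Dom_get_frequent_locations text locations → Pre_get_frequent_locations text locations → Spec_get_frequent_locations text locations (get_frequent_locations text locations)


-- ===== LEMMAS AND PROOFS =====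

/-- the per-hit dictionary update both programs reduce to: `d[k] = d.get(k, 0) + v` -/
def pvAdd (d : PySem.Dict String Int) (p : String × Int) : PySem.Dict String Int :=
  d.insert p.1 (d.getD p.1 0 + p.2)

/-- the stream of (location, weight-1) hits A's nested loop feeds its dict -/
def pvPairsA (ws ls : List String) : List String :=
  ws.flatMap (fun w => ls.filter (fun li => PySem.Str.isIn li w))

/-- the stream of (location, weight) hits B's nested loop feeds its dict -/
def pvPairsB (ws ls : List String) : List (String × Int) :=
  (PySem.Set.ofList ws).flatMap (fun w =>
    ((PySem.Set.ofList ls).filter (fun s => PySem.Str.isIn s w)).map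
      (fun s => (s, (ws.count w : Int) * (ls.count s : Int))))

lemma pv_split_go_all_space (cs : List Char) (h : ∀ c ∈ cs, PySem.Chars.isspace c = true) :
    ∀ acc : List (List Char), PySem.Chars.split₀.go cs [] acc = acc.reverse := by
  induction cs with
  | nil => intro acc; simp [PySem.Chars.split₀.go]
  | cons c rest ih =>
    intro acc
    rw [PySem.Chars.split₀.go]
    simp only [h c (by simp), if_pos, List.isEmpty_nil]
    exact ih (fun x hx => h x (by simp [hx])) acc

lemma pv_strip_nil_split₀_nil (text : String) (hstrip : PySem.Str.strip text = "") :
    PySem.Str.split₀ text = [] := by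
  have htl : PySem.Chars.strip text.toList = [] := by
    have := congrArg String.toList hstrip
    simpa [PySem.Str.strip] using this
  have hall : ∀ c ∈ text.toList, PySem.Chars.isspace c = true := by
    unfold PySem.Chars.strip PySem.Chars.rstrip PySem.Chars.lstrip at htl
    have h2 : ∀ c ∈ (List.dropWhile PySem.Chars.isspace text.toList).reverse,
        PySem.Chars.isspace c = true :=
      List.dropWhile_eq_nil_iff.1 (by simpa [List.reverse_eq_nil_iff] using htl)
    intro c hc
    rcases List.mem_append.1 ((List.takeWhile_append_dropWhile
        (p := PySem.Chars.isspace) (l := text.toList)) ▸ hc) with h | h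
    · exact List.mem_takeWhile_imp h
    · exact h2 c (List.mem_reverse.2 h)
  show List.map String.ofList (PySem.Chars.split₀.go text.toList [] []) = []
  rw [pv_split_go_all_space text.toList hall []]
  rfl

lemma pv_cond_iff (w li : String) (h : li ≠ "") :
    (li.toList = (pyPartition w.toList li.toList).2.1) ↔ PySem.Str.isIn li w = true := by
  have hne : li.toList ≠ [] := fun hnil => h (String.toList_eq_nil_iff.mp hnil)
  unfold pyPartition
  by_cases hf : PySem.Chars.find w.toList li.toList < 0
  · have hninf : ¬ li.toList <:+: w.toList := by
      rw [← PySem.Chars.find_nonneg_iff]; omega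
    simp only [hf, if_pos]
    constructor
    · intro heq; exact absurd heq hne
    · intro hin; exact absurd ((PySem.Str.isIn_iff_infix li w).1 hin) hninf
  · have hinf : li.toList <:+: w.toList := (PySem.Chars.find_nonneg_iff _ _).1 (by omega)
    rw [if_neg hf]
    simp [PySem.Chars.isIn_iff_infix, hinf]
lemma pv_branch_eq (d : PySem.Dict String Int) (k : String) :
    (if d.contains k then d.modify k 0 (· + 1) else d.insert k 1) = d.modify k 0 (· + 1) := by
  by_cases hc : d.contains k = true
  · simp [hc]
  · simp only [hc, Bool.false_eq_true, if_false]
    have : d.modify k 0 (· + 1) = d.insert k (d.getD k 0 + 1) := rfl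
    rw [this, PySem.Dict.getD_of_not_contains d 0 (by simpa using hc)]
    norm_num

lemma pv_A_fold_eq (ws ls : List String) (h : ∀ li ∈ ls, li ≠ "") :
    List.foldl (fun dic word =>
      List.foldl (fun dic i =>
        if (PySem.List.pyGetD ls i "").toList
            = (pyPartition word.toList (PySem.List.pyGetD ls i "").toList).2.1 then
          (if dic.contains (PySem.List.pyGetD ls i "")
            then dic.modify (PySem.List.pyGetD ls i "") 0 (· + 1)
            else dic.insert (PySem.List.pyGetD ls i "") 1)
        else dic) dic (PySem.List.pyRange 0 (ls.length : Int) 1))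
      PySem.Dict.empty ws
   = PySem.Dict.counter (pvPairsA ws ls) := by
  rw [PySem.Dict.counter_eq_foldl]
  unfold pvPairsA
  rw [List.foldl_flatMap]
  refine PySem.List.foldl_congr_mem ws _ _ _ ?_
  intro d w _
  rw [PySem.List.foldl_pyRange_zero_pyGetD' ls "" (fun dic li =>
    if li.toList = (pyPartition w.toList li.toList).2.1 then
      (if dic.contains li then dic.modify li 0 (· + 1) else dic.insert li 1)
    else dic) d]
  rw [PySem.List.foldl_congr_mem ls _
    (fun dic li => if PySem.Str.isIn li w = true then dic.modify li 0 (· + 1) else dic) d ?_]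
  · exact PySem.List.foldl_if_eq_foldl_filter (fun li => PySem.Str.isIn li w)
      (fun dic li => dic.modify li 0 (· + 1)) ls d
  · intro acc li hli
    dsimp only
    by_cases hc : PySem.Str.isIn li w = true
    · rw [if_pos ((pv_cond_iff w li (h li hli)).2 hc), if_pos hc, pv_branch_eq]
    · rw [if_neg (fun hh => hc ((pv_cond_iff w li (h li hli)).1 hh)), if_neg hc]

lemma pv_B_fold_eq (ws ls : List String) :
    List.foldl (fun counts p =>
      List.foldl (fun counts q =>
        if PySem.Str.isIn q.1 p.1 then counts.insert q.1 (counts.getD q.1 0 + p.2 * q.2)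
        else counts) counts (PySem.Dict.counter ls).items)
      PySem.Dict.empty (PySem.Dict.counter ws).items
   = List.foldl pvAdd PySem.Dict.empty (pvPairsB ws ls) := by
  unfold pvPairsB
  rw [List.foldl_flatMap, PySem.Dict.items_counter ws, List.foldl_map]
  refine PySem.List.foldl_congr_mem _ _ _ _ ?_
  intro d w _
  rw [PySem.Dict.items_counter ls, List.foldl_map, List.foldl_map]
  dsimp only
  rw [PySem.List.foldl_if_eq_foldl_filter (fun s => PySem.Str.isIn s w)
    (fun d s => d.insert s (d.getD s 0 + (ws.count w : Int) * (ls.count s : Int))) _ d]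
  rfl

lemma pv_getD_foldl_pvAdd (ps : List (String × Int)) (d : PySem.Dict String Int) (k : String) :
    (List.foldl pvAdd d ps).getD k 0
      = d.getD k 0 + ((ps.filter (fun p => p.1 == k)).map (fun p => p.2)).sum := by
  induction ps generalizing d with
  | nil => simp
  | cons p t ih =>
    rw [List.foldl_cons, ih]
    by_cases hpk : p.1 = k
    · subst hpk
      simp only [pvAdd, PySem.Dict.getD_insert_self, List.filter_cons, beq_self_eq_true,
        if_pos, List.map_cons, List.sum_cons]
      ring
    · have : (pvAdd d p).getD k 0 = d.getD k 0 := by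
        simp [pvAdd, PySem.Dict.getD_insert, Ne.symm hpk]
      rw [this]
      simp [hpk]

lemma pv_items_foldl_pvAdd (ps : List (String × Int)) :
    (List.foldl pvAdd PySem.Dict.empty ps).items
      = (PySem.Set.ofList (ps.map (fun p => p.1))).map
          (fun k => (k, ((ps.filter (fun p => p.1 == k)).map (fun p => p.2)).sum)) := by
  have hfold : List.foldl pvAdd PySem.Dict.empty ps
      = List.foldl (fun (d : PySem.Dict String Int) (p : String × Int) =>
          d.insert p.1 (d.getD p.1 0 + p.2)) PySem.Dict.empty ps := rfl
  have hkeys : (List.foldl pvAdd PySem.Dict.empty ps).keys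
      = PySem.Set.ofList (ps.map (fun p => p.1)) := by
    rw [hfold, PySem.Dict.keys_foldl_insert_key ps (fun p => p.1)
      (fun d p => d.getD p.1 0 + p.2) PySem.Dict.empty, PySem.Dict.keys_empty]
    rfl
  have hnd : (List.foldl pvAdd PySem.Dict.empty ps).keys.Nodup := by
    rw [hfold]
    exact PySem.Dict.nodup_keys_foldl_insert_key ps (fun p => p.1) _ _ PySem.Dict.nodup_keys_empty
  rw [PySem.Dict.items_eq_map_keys _ hnd 0, hkeys]
  refine List.map_congr_left ?_
  intro k _
  rw [pv_getD_foldl_pvAdd, PySem.Dict.getD_empty, zero_add]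

lemma pv_set_add_of_mem {s : PySem.Set String} {x : String} (h : x ∈ s) : PySem.Set.add s x = s := by
  simp [PySem.Set.add, PySem.Set.contains, h]

lemma pv_set_add_of_not_mem {s : PySem.Set String} {x : String} (h : x ∉ s) :
    PySem.Set.add s x = s ++ [x] := by
  simp [PySem.Set.add, PySem.Set.contains, h]

lemma pv_mem_update (s : PySem.Set String) (ys : List String) (x : String) :
    x ∈ PySem.Set.update s ys ↔ x ∈ s ∨ x ∈ ys := by
  induction ys generalizing s with
  | nil => simp [PySem.Set.update]
  | cons y t ih =>
    simp only [PySem.Set.update, List.foldl_cons] at *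
    rw [ih]
    simp [PySem.Set.mem_add, List.mem_cons]
    tauto

lemma pv_update_of_subset (ys : List String) (s : PySem.Set String) (h : ∀ y ∈ ys, y ∈ s) :
    PySem.Set.update s ys = s := by
  induction ys generalizing s with
  | nil => rfl
  | cons y t ih =>
    simp only [PySem.Set.update, List.foldl_cons] at *
    rw [pv_set_add_of_mem (h y (by simp))]
    exact ih s (fun x hx => h x (by simp [hx]))

lemma pv_update_append (s : PySem.Set String) (xs ys : List String) :
    PySem.Set.update s (xs ++ ys) = PySem.Set.update (PySem.Set.update s xs) ys := by
  simp [PySem.Set.update, List.foldl_append]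

lemma pv_update_filter_ofList (m : List String) (p : String → Bool) (s : PySem.Set String) :
    PySem.Set.update s (m.filter p) = PySem.Set.update s ((PySem.Set.ofList m).filter p) := by
  induction m using List.reverseRecOn generalizing s with
  | nil => rfl
  | append_singleton m x ih =>
    rw [List.filter_append, PySem.Set.ofList_eq_foldl, List.foldl_append]
    rw [← PySem.Set.ofList_eq_foldl]
    simp only [List.foldl_cons, List.foldl_nil]
    by_cases hx : x ∈ m
    · rw [pv_set_add_of_mem (by simpa [PySem.Set.mem_ofList] using hx)]
      by_cases hp : p x = true
      · simp only [List.filter_cons, hp, if_pos, List.filter_nil]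
        rw [pv_update_append, ih]
        refine pv_update_of_subset _ _ ?_
        intro y hy
        simp only [List.mem_singleton] at hy
        subst hy
        rw [pv_mem_update]
        right
        exact List.mem_filter.2 ⟨by simpa [PySem.Set.mem_ofList] using hx, hp⟩
      · simp only [List.filter_cons, hp]
        simp only [Bool.false_eq_true, if_false, List.filter_nil, List.append_nil]
        exact ih s
    · rw [pv_set_add_of_not_mem (by simpa [PySem.Set.mem_ofList] using hx)]
      rw [List.filter_append, pv_update_append, pv_update_append, ih]

lemma pv_update_flatMap_congr (g g' : String → List String)
    (hg : ∀ w s, PySem.Set.update s (g w) = PySem.Set.update s (g' w)) :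
    ∀ (l : List String) (s : PySem.Set String),
      PySem.Set.update s (l.flatMap g) = PySem.Set.update s (l.flatMap g') := by
  intro l
  induction l with
  | nil => intro s; rfl
  | cons w t ih =>
    intro s
    simp only [List.flatMap_cons]
    rw [pv_update_append, pv_update_append, hg, ih]

lemma pv_update_flatMap_ofList (g : String → List String) (l : List String) (s : PySem.Set String) :
    PySem.Set.update s (l.flatMap g) = PySem.Set.update s ((PySem.Set.ofList l).flatMap g) := by
  induction l using List.reverseRecOn generalizing s with
  | nil => rfl
  | append_singleton l x ih =>
    rw [List.flatMap_append, PySem.Set.ofList_eq_foldl, List.foldl_append,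
      ← PySem.Set.ofList_eq_foldl]
    simp only [List.foldl_cons, List.foldl_nil, List.flatMap_singleton]
    by_cases hx : x ∈ l
    · rw [pv_set_add_of_mem (by simpa [PySem.Set.mem_ofList] using hx), ← ih,
        pv_update_append]
      refine pv_update_of_subset _ _ ?_
      intro y hy
      rw [pv_mem_update]
      right
      exact List.mem_flatMap.2 ⟨x, hx, hy⟩
    · rw [pv_set_add_of_not_mem (by simpa [PySem.Set.mem_ofList] using hx),
        List.flatMap_append, pv_update_append, pv_update_append, ih]
      simp

lemma pv_keys_eq (ws ls : List String) :
    PySem.Set.ofList ((pvPairsB ws ls).map (fun p => p.1)) = PySem.Set.ofList (pvPairsA ws ls) := by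
  have hmap : (pvPairsB ws ls).map (fun p => p.1)
      = (PySem.Set.ofList ws).flatMap (fun w =>
          (PySem.Set.ofList ls).filter (fun s => PySem.Str.isIn s w)) := by
    unfold pvPairsB
    rw [List.map_flatMap]
    simp only [List.map_map, Function.comp_def, List.map_id']
  rw [hmap]
  unfold pvPairsA
  have h1 := pv_update_flatMap_ofList (fun w => ls.filter (fun s => PySem.Str.isIn s w)) ws []
  have h2 := pv_update_flatMap_congr (fun w => ls.filter (fun s => PySem.Str.isIn s w))
    (fun w => (PySem.Set.ofList ls).filter (fun s => PySem.Str.isIn s w))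
    (fun w s => pv_update_filter_ofList ls (fun s => PySem.Str.isIn s w) s)
    (PySem.Set.ofList ws) []
  show PySem.Set.update []
      ((PySem.Set.ofList ws).flatMap (fun w => (PySem.Set.ofList ls).filter (fun s => PySem.Str.isIn s w)))
    = PySem.Set.update [] (ws.flatMap (fun w => ls.filter (fun s => PySem.Str.isIn s w)))
  rw [← h2, ← h1]
lemma pv_sum_ite_const (c : Nat) (p : String → Bool) (l : List String) :
    (l.map (fun w => if p w then c else 0)).sum = c * l.countP p := by
  induction l with
  | nil => rfl
  | cons x t ih =>
    by_cases hx : p x = true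
    · simp [hx, ih, Nat.mul_succ]; ring
    · simp [hx, ih]

lemma pv_valA (ws ls : List String) (k : String) :
    (pvPairsA ws ls).count k = ls.count k * ws.countP (fun w => PySem.Str.isIn k w) := by
  unfold pvPairsA
  rw [List.count_flatMap]
  have hcongr : List.map (List.count k ∘ fun w => ls.filter (fun li => PySem.Str.isIn li w)) ws
      = List.map (fun w => if PySem.Str.isIn k w then ls.count k else 0) ws := by
    refine List.map_congr_left ?_
    intro w _
    simp only [Function.comp]
    by_cases hin : PySem.Str.isIn k w = true
    · rw [if_pos hin,
        List.count_filter (p := fun li => PySem.Str.isIn li w) (a := k) (l := ls) hin]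
    · rw [if_neg hin, List.count_eq_zero]
      intro hmem
      exact hin (List.mem_filter.1 hmem).2
  rw [hcongr, pv_sum_ite_const]

lemma pv_countP_eq_sum_ofList (ws : List String) (p : String → Bool) :
    (((PySem.Set.ofList ws).filter p).map (fun w => ws.count w)).sum = ws.countP p := by
  have hperm : (PySem.Set.ofList ws).Perm ws.dedup :=
    (List.perm_ext_iff_of_nodup (PySem.Set.nodup_ofList ws) ws.nodup_dedup).2
      (by intro a; simp [PySem.Set.mem_ofList, List.mem_dedup])
  rw [List.Perm.sum_eq (List.Perm.map _ (List.Perm.filter p hperm))]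
  exact List.sum_map_count_dedup_filter_eq_countP p ws

lemma pv_block_sum (u : List String) (hu : u.Nodup) (k : String) (g : String → Int) :
    (List.map (fun p => p.2) (List.filter (fun p => p.1 == k)
        (List.map (fun s => (s, g s)) u))).sum
      = if k ∈ u then g k else 0 := by
  induction u with
  | nil => simp
  | cons x t ih =>
    simp only [List.nodup_cons] at hu
    by_cases hxk : x = k
    · subst hxk
      have ht : (List.map (fun p => p.2) (List.filter (fun p => p.1 == x)
          (List.map (fun s => (s, g s)) t))).sum = 0 := by
        rw [ih hu.2, if_neg hu.1]
      simp only [List.map_cons, List.filter_cons, beq_self_eq_true, if_pos,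
        List.map_cons, List.sum_cons, ht, List.mem_cons, true_or, if_pos]
      ring
    · have hmm : k ∈ x :: t ↔ k ∈ t := by simp [List.mem_cons, Ne.symm hxk]
      rw [if_congr hmm rfl rfl, ← ih hu.2]
      simp [List.map_cons, hxk]

lemma pv_sum_ite_filter (l : List String) (p : String → Bool) (f : String → Nat) :
    (l.map (fun w => if p w then f w else 0)).sum = ((l.filter p).map f).sum := by
  induction l with
  | nil => rfl
  | cons x t ih => by_cases hx : p x = true <;> simp [hx, ih]

lemma pv_valB (ws ls : List String) (k : String) (hk : k ∈ ls) :
    (((pvPairsB ws ls).filter (fun p => p.1 == k)).map (fun p => p.2)).sum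
      = (ls.count k : Int) * (ws.countP (fun w => PySem.Str.isIn k w) : Int) := by
  unfold pvPairsB
  rw [List.filter_flatMap, List.map_flatMap, List.flatMap, List.sum_flatten, List.map_map]
  have hblock : ∀ w : String,
      (List.sum ∘ fun a =>
        List.map (fun p => p.2) (List.filter (fun p => p.1 == k)
          (List.map (fun s => (s, (ws.count a : Int) * (ls.count s : Int)))
            (List.filter (fun s => PySem.Str.isIn s a) (PySem.Set.ofList ls))))) w
      = ((if PySem.Str.isIn k w then ws.count w else 0 : Nat) : Int) * (ls.count k : Int) := by
    intro w
    simp only [Function.comp_apply]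
    rw [pv_block_sum _ ((PySem.Set.nodup_ofList ls).filter _) k
      (fun s => (ws.count w : Int) * (ls.count s : Int))]
    have hmem : (k ∈ (PySem.Set.ofList ls).filter (fun s => PySem.Str.isIn s w))
        ↔ PySem.Str.isIn k w = true := by
      rw [List.mem_filter, PySem.Set.mem_ofList]
      simp [hk]
    by_cases hin : PySem.Str.isIn k w = true
    · rw [if_pos (hmem.2 hin), if_pos hin]
    · rw [if_neg (fun hh => hin (hmem.1 hh)), if_neg hin]
      simp
  rw [List.map_congr_left (fun w _ => hblock w), List.sum_map_mul_right]
  have : List.map (fun w => ((if PySem.Str.isIn k w then ws.count w else 0 : Nat) : Int))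
      (PySem.Set.ofList ws)
      = List.map Nat.cast (List.map (fun w => if PySem.Str.isIn k w then ws.count w else 0)
          (PySem.Set.ofList ws)) := by
    rw [List.map_map]; rfl
  rw [this, ← Nat.cast_list_sum, pv_sum_ite_filter, pv_countP_eq_sum_ofList]
  ring
lemma pv_mem_pairsA_mem_ls {ws ls : List String} {k : String} (h : k ∈ pvPairsA ws ls) : k ∈ ls := by
  simp only [pvPairsA, List.mem_flatMap] at h
  obtain ⟨w, _, hw⟩ := h
  exact (List.mem_filter.1 hw).1

lemma pv_dicts_eq (ws ls : List String) :
    PySem.Dict.counter (pvPairsA ws ls) = List.foldl pvAdd PySem.Dict.empty (pvPairsB ws ls) := by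
  apply PySem.Dict.ext
  rw [PySem.Dict.items_counter, pv_items_foldl_pvAdd, pv_keys_eq]
  refine List.map_congr_left ?_
  intro k hk
  have hkls : k ∈ ls := pv_mem_pairsA_mem_ls ((PySem.Set.mem_ofList _ _).1 hk)
  rw [pv_valB ws ls k hkls, pv_valA]
  push_cast
  ring_nf

-- ===== VERDICT (by name: the statement is the Claim_ definition above) =====
theorem get_frequent_locations_spec : Claim_equal_get_frequent_locations := by
  intro text locations _ hpre
  unfold Spec_get_frequent_locations
  by_cases hmem : "" ∈ locations
  · simp only [get_frequent_locations, get_frequent_locations_alt,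
      pv_strip_nil_split₀_nil text (hpre hmem)]
    rfl
  · have h : ∀ li ∈ locations, li ≠ "" := fun li hli heq => hmem (heq ▸ hli)
    simp only [get_frequent_locations, get_frequent_locations_alt]
    rw [PySem.Dict.foldl_insert_getD_add_one_eq_counter,
        PySem.Dict.foldl_insert_getD_add_one_eq_counter,
        pv_A_fold_eq _ _ h, pv_B_fold_eq, pv_dicts_eq]
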